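-- pv_equiv track=rewrite | github.com/megulus/code-challenges | calendar.py | countDaysInElapsedYears
-- ===== SOURCE A (Python) =====
-- STARTYEAR = 1753
--
-- def isLeapYear(year):
--   if year % 4 == 0:
--     if year % 100 == 0:
--       if year % 400 == 0:
--         return True
--       else:
--         return False
--     else:
--       return True
--   return False
--
-- def countDaysInElapsedYears(elapsedYears):
--   count = 0
--   for i in range(elapsedYears):
--     year = STARTYEAR + i
--     if isLeapYear(year):
--       count += 366
--     else:
--       count += 365
--   return count
-- ===== SOURCE B (Python) =====
-- def countDaysInElapsedYears(elapsedYears):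
--     if elapsedYears <= 0:
--         return 0
--     last = 1752 + elapsedYears  # last elapsed year
--     # leap years in [1753, last] via floor-division counting formula
--     leaps = last // 4 - last // 100 + last // 400 - 425  # 425 = leaps up to 1752
--     return 365 * elapsedYears + leaps
-- ===== Notes on version B (the rewrite author's own statement) =====
-- stated objective: faster
-- what changed: Replaced the per-year loop with a closed-form O(1) count: 365 per year plus the number of leap years in [1753, 1752+n] computed by the floor-division formula n//4 - n//100 + n//400.
import Mathlib
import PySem

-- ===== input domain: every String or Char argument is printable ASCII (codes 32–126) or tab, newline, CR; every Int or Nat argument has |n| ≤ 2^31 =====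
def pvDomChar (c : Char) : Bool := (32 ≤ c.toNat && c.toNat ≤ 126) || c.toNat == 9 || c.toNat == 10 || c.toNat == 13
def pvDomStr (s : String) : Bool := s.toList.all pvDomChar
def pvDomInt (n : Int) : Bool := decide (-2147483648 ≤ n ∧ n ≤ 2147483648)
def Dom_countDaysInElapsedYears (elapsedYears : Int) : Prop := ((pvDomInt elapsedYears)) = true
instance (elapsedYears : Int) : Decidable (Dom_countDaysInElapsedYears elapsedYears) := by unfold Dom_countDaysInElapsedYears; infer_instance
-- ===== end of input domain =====

-- B replaces A's per-year loop by a closed-form leap-year count (floor-division formula); objective: faster (O(1) vs O(n)).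


-- ===== PORT A =====
def isLeapYear (year : Int) : Bool :=
  if PySem.Int.mod year 4 == 0 then
    if PySem.Int.mod year 100 == 0 then
      if PySem.Int.mod year 400 == 0 then true else false
    else true
  else false

def countDaysInElapsedYears (elapsedYears : Int) : Int :=
  (PySem.List.pyRange 0 elapsedYears 1).foldl
    (fun count i =>
      let year := 1753 + i
      if isLeapYear year then count + 366 else count + 365) 0

-- ===== PORT B =====
def countDaysInElapsedYears_alt (elapsedYears : Int) : Int :=
  if elapsedYears ≤ 0 then 0
  else
    let last := 1752 + elapsedYears
    let leaps := PySem.Int.floordiv last 4 - PySem.Int.floordiv last 100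
                   + PySem.Int.floordiv last 400 - 425
    365 * elapsedYears + leaps

-- ===== PRECONDITION & SPEC =====
def Spec_countDaysInElapsedYears (elapsedYears : Int) (out : Int) : Prop := out = countDaysInElapsedYears_alt elapsedYears
instance (elapsedYears : Int) (out : Int) : Decidable (Spec_countDaysInElapsedYears elapsedYears out) := by unfold Spec_countDaysInElapsedYears; infer_instance

-- ===== CLAIM (what is proved, stated in full; the proofs are below) =====
def Claim_equal_countDaysInElapsedYears : Prop := ∀ (elapsedYears : Int), Dom_countDaysInElapsedYears elapsedYears → Spec_countDaysInElapsedYears elapsedYears (countDaysInElapsedYears elapsedYears)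

-- ===== LEMMAS AND PROOFS =====

-- closed-form leap count up to year y (helper for the proof only)
def leapsUpTo (y : Int) : Int :=
  PySem.Int.floordiv y 4 - PySem.Int.floordiv y 100 + PySem.Int.floordiv y 400

theorem leapsUpTo_succ (y : Int) :
    leapsUpTo y = leapsUpTo (y - 1) + (if isLeapYear y then 1 else 0) := by
  unfold leapsUpTo isLeapYear
  rw [PySem.Int.floordiv_eq_ediv_of_pos (a := y) (b := 4) (by norm_num),
      PySem.Int.floordiv_eq_ediv_of_pos (a := y) (b := 100) (by norm_num),
      PySem.Int.floordiv_eq_ediv_of_pos (a := y) (b := 400) (by norm_num),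
      PySem.Int.floordiv_eq_ediv_of_pos (a := y - 1) (b := 4) (by norm_num),
      PySem.Int.floordiv_eq_ediv_of_pos (a := y - 1) (b := 100) (by norm_num),
      PySem.Int.floordiv_eq_ediv_of_pos (a := y - 1) (b := 400) (by norm_num),
      PySem.Int.mod_eq_emod_of_pos (a := y) (b := 4) (by norm_num),
      PySem.Int.mod_eq_emod_of_pos (a := y) (b := 100) (by norm_num),
      PySem.Int.mod_eq_emod_of_pos (a := y) (b := 400) (by norm_num)]
  split_ifs with h1 h2 h3 <;> simp_all <;> omega

theorem portA_closed (m : Nat) :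
    countDaysInElapsedYears (m : Int) = 365 * m + (leapsUpTo (1752 + m) - 425) := by
  induction m with
  | zero => decide
  | succ k ih =>
      unfold countDaysInElapsedYears at *
      rw [show ((k + 1 : Nat) : Int) = (k : Int) + 1 by push_cast; ring,
          PySem.List.pyRange_one_succ_right (by positivity), List.foldl_append, ih]
      have h := leapsUpTo_succ (1752 + (k : Int) + 1)
      simp only [List.foldl]
      rw [show (1752 + ((k:Int) + 1)) = 1752 + (k:Int) + 1 by ring]
      split_ifs with hl
      · rw [show (1753 + (k:Int)) = 1752 + (k:Int) + 1 by ring] at hl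
        simp [hl] at h
        omega
      · rw [show (1753 + (k:Int)) = 1752 + (k:Int) + 1 by ring] at hl
        simp [hl] at h
        omega

theorem portB_closed (m : Nat) :
    countDaysInElapsedYears_alt (m : Int) = 365 * m + (leapsUpTo (1752 + m) - 425) := by
  unfold countDaysInElapsedYears_alt leapsUpTo
  split_ifs with h
  · have : m = 0 := by exact_mod_cast le_antisymm h (by positivity)
    subst this; decide
  · ring

-- ===== VERDICT (by name: the statement is the Claim_ definition above) =====
theorem countDaysInElapsedYears_spec : Claim_equal_countDaysInElapsedYears := by
  intro n _
  unfold Spec_countDaysInElapsedYears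
  by_cases h : n ≤ 0
  · unfold countDaysInElapsedYears countDaysInElapsedYears_alt
    rw [PySem.List.pyRange_one_eq_nil h]
    simp [h]
  · obtain ⟨m, rfl⟩ : ∃ m : Nat, n = (m : Int) := ⟨n.toNat, (Int.toNat_of_nonneg (by omega)).symm⟩
    rw [portA_closed, portB_closed]
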